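-- pv_equiv track=rewrite | github.com/pavithragowda00/python-projects | adjust_summary.py | summarize_incident
-- ===== SOURCE A (Python) =====
-- HIGH_THRESHOLD = 80
--
-- MEDIUM_THRESHOLD = 50
--
-- def classify_indicator(indicator):
--     score = indicator["score"]
--     if score >= HIGH_THRESHOLD:
--         return "HIGH"
--     elif score >= MEDIUM_THRESHOLD:
--         return "MEDIUM"
--     else:
--         return "LOW"
--
-- def summarize_incident(indicators_list):
--     high = medium = low = 0
--
--     for item in indicators_list:
--         level = classify_indicator(item)
--         if level == "HIGH":
--             high += 1
--         elif level == "MEDIUM":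
--             medium += 1
--         else:
--             low += 1
--
--     if high > 0:
--         final_level = "HIGH"
--     elif medium > 0:
--         final_level = "MEDIUM"
--     else:
--         final_level = "LOW"
--
--     # Return a tuple (immutable)
--     return final_level, high, medium, low
-- ===== SOURCE B (Python) =====
-- HIGH_THRESHOLD = 80
-- MEDIUM_THRESHOLD = 50
--
-- def summarize_incident(indicators_list):
--     high = sum(1 for x in indicators_list if x["score"] >= HIGH_THRESHOLD)
--     medium = sum(1 for x in indicators_list if MEDIUM_THRESHOLD <= x["score"] < HIGH_THRESHOLD)
--     low = sum(1 for x in indicators_list if x["score"] < MEDIUM_THRESHOLD)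
--     final_level = "HIGH" if high > 0 else ("MEDIUM" if medium > 0 else "LOW")
--     return final_level, high, medium, low
-- ===== Notes on version B (the rewrite author's own statement) =====
-- stated objective: alternative
-- what changed: Replaces the single counting loop with three independent filtered passes (one per severity band) and a conditional expression for the final level.
import Mathlib
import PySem

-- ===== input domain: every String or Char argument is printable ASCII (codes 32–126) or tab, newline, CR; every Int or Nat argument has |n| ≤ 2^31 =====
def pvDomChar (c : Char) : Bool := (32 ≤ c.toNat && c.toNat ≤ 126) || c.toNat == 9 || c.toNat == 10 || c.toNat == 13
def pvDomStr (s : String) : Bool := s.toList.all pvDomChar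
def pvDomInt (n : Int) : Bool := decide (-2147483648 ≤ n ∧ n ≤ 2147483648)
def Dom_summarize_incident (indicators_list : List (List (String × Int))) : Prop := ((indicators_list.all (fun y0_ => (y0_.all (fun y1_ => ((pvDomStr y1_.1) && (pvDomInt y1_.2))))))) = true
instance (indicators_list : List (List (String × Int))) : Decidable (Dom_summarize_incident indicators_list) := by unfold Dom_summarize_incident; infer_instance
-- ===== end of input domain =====

-- B replaces A's single counting loop with three independent filtered passes (same O(n) cost, different decomposition).


-- ===== PORT A =====
-- item["score"]: Pre_ guarantees the key is present, so the default 0 is never used inside Pre_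
def pyScoreA (item : List (String × Int)) : Int := (List.lookup "score" item).getD 0

def classify_indicator (indicator : List (String × Int)) : String :=
  let score := pyScoreA indicator
  if score ≥ 80 then "HIGH"
  else if score ≥ 50 then "MEDIUM"
  else "LOW"

def summarize_incident (indicators_list : List (List (String × Int))) : String × Int × Int × Int :=
  let st := indicators_list.foldl (fun (acc : Int × Int × Int) item =>
    let level := classify_indicator item
    if level == "HIGH" then (acc.1 + 1, acc.2.1, acc.2.2)
    else if level == "MEDIUM" then (acc.1, acc.2.1 + 1, acc.2.2)
    else (acc.1, acc.2.1, acc.2.2 + 1)) (0, 0, 0)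
  let final_level := if st.1 > 0 then "HIGH" else if st.2.1 > 0 then "MEDIUM" else "LOW"
  (final_level, st.1, st.2.1, st.2.2)

-- ===== PORT B =====
def pyScoreB (item : List (String × Int)) : Int := (List.lookup "score" item).getD 0

def summarize_incident_alt (indicators_list : List (List (String × Int))) : String × Int × Int × Int :=
  let high : Int := (indicators_list.filter (fun x => pyScoreB x ≥ 80)).length
  let medium : Int := (indicators_list.filter (fun x => 50 ≤ pyScoreB x ∧ pyScoreB x < 80)).length
  let low : Int := (indicators_list.filter (fun x => pyScoreB x < 50)).length
  let final_level := if high > 0 then "HIGH" else if medium > 0 then "MEDIUM" else "LOW"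
  (final_level, high, medium, low)

-- ===== PRECONDITION & SPEC =====
-- Pre_ excludes items missing the "score" key, on which A raises KeyError.
def Pre_summarize_incident (indicators_list : List (List (String × Int))) : Prop :=
  (indicators_list.all (fun item => item.any (fun kv => kv.1 == "score"))) = true
instance (indicators_list : List (List (String × Int))) : Decidable (Pre_summarize_incident indicators_list) := by unfold Pre_summarize_incident; infer_instance

def pvWitness_summarize_incident : (List (List (String × Int))) := [[("score", 90)], [("score", 60)], [("score", 10)]]

def Spec_summarize_incident (indicators_list : List (List (String × Int))) (out : String × Int × Int × Int) : Prop := out = summarize_incident_alt indicators_list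
instance (indicators_list : List (List (String × Int))) (out : String × Int × Int × Int) : Decidable (Spec_summarize_incident indicators_list out) := by unfold Spec_summarize_incident; infer_instance

-- ===== CLAIM (what is proved, stated in full; the proofs are below) =====
def Claim_equal_summarize_incident : Prop := ∀ (indicators_list : List (List (String × Int))), Dom_summarize_incident indicators_list → Pre_summarize_incident indicators_list → Spec_summarize_incident indicators_list (summarize_incident indicators_list)

-- ===== LEMMAS AND PROOFS =====
lemma foldl_counts (l : List (List (String × Int))) (h m lo : Int) :
    l.foldl (fun (acc : Int × Int × Int) item =>
      let level := classify_indicator item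
      if level == "HIGH" then (acc.1 + 1, acc.2.1, acc.2.2)
      else if level == "MEDIUM" then (acc.1, acc.2.1 + 1, acc.2.2)
      else (acc.1, acc.2.1, acc.2.2 + 1)) (h, m, lo)
    = (h + ((l.filter (fun x => pyScoreB x ≥ 80)).length : Int),
       m + ((l.filter (fun x => 50 ≤ pyScoreB x ∧ pyScoreB x < 80)).length : Int),
       lo + ((l.filter (fun x => pyScoreB x < 50)).length : Int)) := by
  induction l generalizing h m lo with
  | nil => simp
  | cons a t ih =>
    have hBA : pyScoreB a = pyScoreA a := rfl
    simp only [List.foldl_cons, List.filter_cons, hBA]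
    rcases lt_or_ge (pyScoreA a) 50 with h50 | h50
    · have hc : classify_indicator a = "LOW" := by
        simp [classify_indicator, show ¬ pyScoreA a ≥ 80 by omega, show ¬ pyScoreA a ≥ 50 by omega]
      rw [hc]
      simp only [show ¬ pyScoreA a ≥ 80 by omega, show ¬ (50 ≤ pyScoreA a ∧ pyScoreA a < 80) by omega,
        show pyScoreA a < 50 from h50, decide_true, decide_false, if_true, if_false]
      simp only [show (("LOW" == "HIGH") = false) by decide, show (("LOW" == "MEDIUM") = false) by decide,
        Bool.false_eq_true, if_false, ih]
      simp; push_cast; ring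
    · rcases lt_or_ge (pyScoreA a) 80 with h80 | h80
      · have hc : classify_indicator a = "MEDIUM" := by
          simp [classify_indicator, show ¬ pyScoreA a ≥ 80 by omega, show pyScoreA a ≥ 50 from h50]
        rw [hc]
        simp only [show ¬ pyScoreA a ≥ 80 by omega, show (50 ≤ pyScoreA a ∧ pyScoreA a < 80) from ⟨h50, h80⟩,
          show ¬ pyScoreA a < 50 by omega, decide_true, decide_false, if_true, if_false]
        simp only [show (("MEDIUM" == "HIGH") = false) by decide, show (("MEDIUM" == "MEDIUM") = true) by decide,
          Bool.false_eq_true, if_false, if_true, ih]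
        simp; push_cast; ring
      · have hc : classify_indicator a = "HIGH" := by
          simp [classify_indicator, show pyScoreA a ≥ 80 from h80]
        rw [hc]
        simp only [show pyScoreA a ≥ 80 from h80, show ¬ (50 ≤ pyScoreA a ∧ pyScoreA a < 80) by omega,
          show ¬ pyScoreA a < 50 by omega, decide_true, decide_false, if_true, if_false]
        simp only [show (("HIGH" == "HIGH") = true) by decide, if_true, ih]
        simp; push_cast; ring

-- ===== VERDICT (by name: the statement is the Claim_ definition above) =====
theorem summarize_incident_spec : Claim_equal_summarize_incident := by
  intro l _ _
  show summarize_incident l = summarize_incident_alt l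
  simp only [summarize_incident, summarize_incident_alt, foldl_counts]
  norm_num
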